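-- pv_equiv track=rewrite | github.com/pypi-data/pypi-mirror-403 | packages/ethspecify/ethspecify-0.3.5-py3-none-any.whl/ethspecify/core.py | _trace_item_history
-- ===== SOURCE A (Python) =====
-- def _trace_item_history(item_name, category, all_forks, pyspec, preset):
--     """
--     Trace the history of a specific item across all forks.
--     Returns a list of forks where the item was introduced or modified.
--     """
--     history_forks = []
--     previous_content = None
--
--     for fork in all_forks:
--         if (fork in pyspec[preset] and
--             category in pyspec[preset][fork] and
--             item_name in pyspec[preset][fork][category]):
--
--             current_content = pyspec[preset][fork][category][item_name]
--
--             if previous_content is None: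
--                 # First appearance
--                 history_forks.append(fork)
--             elif current_content != previous_content:
--                 # Content changed
--                 history_forks.append(fork)
--
--             previous_content = current_content
--
--     return history_forks
-- ===== SOURCE B (Python) =====
-- def _trace_item_history(item_name, category, all_forks, pyspec, preset):
--     # build the (fork, content) pairs for the forks where the item is present,
--     # then take the first fork of each maximal run of equal contents
--     pairs = [(fork, pyspec[preset][fork][category][item_name])
--              for fork in all_forks
--              if (fork in pyspec[preset]
--                  and category in pyspec[preset][fork]
--                  and item_name in pyspec[preset][fork][category])]
--     history_forks = []
--     i = 0
--     n = len(pairs)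
--     while i < n:
--         fork, content = pairs[i]
--         history_forks.append(fork)
--         while i < n and pairs[i][1] == content:
--             i += 1
--     return history_forks
-- ===== Notes on version B (the rewrite author's own statement) =====
-- stated objective: alternative
-- what changed: Replaces the stateful previous_content loop with a two-phase build-then-group: first collect the (fork, content) pairs of the present forks, then emit the first fork of each maximal run of equal contents via an index-based run scan.
import Mathlib
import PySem

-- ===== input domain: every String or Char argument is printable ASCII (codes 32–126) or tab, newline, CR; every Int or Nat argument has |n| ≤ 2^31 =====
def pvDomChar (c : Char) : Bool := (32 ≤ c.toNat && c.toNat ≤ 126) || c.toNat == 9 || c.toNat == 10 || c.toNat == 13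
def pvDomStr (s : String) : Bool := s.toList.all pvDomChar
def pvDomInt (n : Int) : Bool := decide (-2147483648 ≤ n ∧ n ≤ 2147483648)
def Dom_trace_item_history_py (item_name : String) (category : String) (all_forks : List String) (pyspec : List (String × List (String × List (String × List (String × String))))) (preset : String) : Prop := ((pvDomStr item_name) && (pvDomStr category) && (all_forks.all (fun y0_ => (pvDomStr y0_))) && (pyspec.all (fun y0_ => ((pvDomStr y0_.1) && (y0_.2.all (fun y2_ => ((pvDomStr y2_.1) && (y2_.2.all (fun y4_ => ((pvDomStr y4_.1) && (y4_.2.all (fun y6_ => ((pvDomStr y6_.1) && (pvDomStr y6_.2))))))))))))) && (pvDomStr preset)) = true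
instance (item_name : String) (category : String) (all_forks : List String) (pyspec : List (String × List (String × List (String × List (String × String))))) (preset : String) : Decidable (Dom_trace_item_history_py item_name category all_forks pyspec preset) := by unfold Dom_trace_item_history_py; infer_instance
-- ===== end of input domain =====

-- B replaces A's stateful previous_content loop by collecting the present (fork, content)
-- pairs first and then emitting the first fork of each maximal run of equal contents (alternative decomposition).


-- ===== PORT A =====
-- shared helper: dict lookup on the association list (first match), as both Pythons do
def pvGet? {α : Type} (d : List (String × α)) (k : String) : Option α :=
  (d.find? (fun p => p.1 == k)).map Prod.snd

-- the chained membership tests + lookups 'pyspec[preset][fork][category][item_name]' of both Pythons;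
-- 'none' at the preset level is where Python raises KeyError (excluded by Pre_ when all_forks ≠ [])
def pvContent? (pyspec : List (String × List (String × List (String × List (String × String))))) (preset category item_name fork : String) : Option String :=
  match pvGet? pyspec preset with
  | none => none
  | some pd =>
    match pvGet? pd fork with
    | none => none
    | some fd =>
      match pvGet? fd category with
      | none => none
      | some cd => pvGet? cd item_name

def trace_item_history_py (item_name : String) (category : String) (all_forks : List String) (pyspec : List (String × List (String × List (String × List (String × String))))) (preset : String) : List String :=
  (all_forks.foldl (fun (st : List String × Option String) fork =>
      match pvContent? pyspec preset category item_name fork with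
      | none => st
      | some cur =>
        match st.2 with
        | none => (st.1 ++ [fork], some cur)          -- first appearance
        | some prev =>                                 -- content changed?
          (if cur ≠ prev then st.1 ++ [fork] else st.1, some cur))
    (([] : List String), (none : Option String))).1

-- ===== PORT B =====
-- first fork of each maximal run of equal contents (Source B's index loop, as structural recursion)
def pvRunFirsts : List (String × String) → List String
  | [] => []
  | (f, c) :: rest => f :: pvRunFirsts (rest.dropWhile (fun p => p.2 == c))
termination_by ps => ps.length
decreasing_by exact Nat.lt_succ_of_le (List.length_dropWhile_le _ _)

def trace_item_history_py_alt (item_name : String) (category : String) (all_forks : List String) (pyspec : List (String × List (String × List (String × List (String × String))))) (preset : String) : List String :=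
  pvRunFirsts (all_forks.filterMap (fun fork =>
    (pvContent? pyspec preset category item_name fork).map (fun c => (fork, c))))

-- ===== PRECONDITION & SPEC =====
-- Pre_ excludes exactly the inputs where Python A raises KeyError: a nonempty all_forks with
-- preset absent from pyspec (B raises there too).
def Pre_trace_item_history_py (item_name : String) (category : String) (all_forks : List String) (pyspec : List (String × List (String × List (String × List (String × String))))) (preset : String) : Prop :=
  all_forks = [] ∨ preset ∈ pyspec.map Prod.fst
instance (item_name : String) (category : String) (all_forks : List String) (pyspec : List (String × List (String × List (String × List (String × String))))) (preset : String) : Decidable (Pre_trace_item_history_py item_name category all_forks pyspec preset) := by unfold Pre_trace_item_history_py; infer_instance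

def pvWitness_trace_item_history_py : String × String × List String × (List (String × List (String × List (String × List (String × String))))) × String :=
  ("it", "cat", ["a", "b", "c"], [("p", [("a", [("cat", [("it", "x")])]), ("b", [("cat", [("it", "x")])]), ("c", [("cat", [("it", "y")])])])], "p")

def Spec_trace_item_history_py (item_name : String) (category : String) (all_forks : List String) (pyspec : List (String × List (String × List (String × List (String × String))))) (preset : String) (out : List String) : Prop := out = trace_item_history_py_alt item_name category all_forks pyspec preset
instance (item_name : String) (category : String) (all_forks : List String) (pyspec : List (String × List (String × List (String × List (String × String))))) (preset : String) (out : List String) : Decidable (Spec_trace_item_history_py item_name category all_forks pyspec preset out) := by unfold Spec_trace_item_history_py; infer_instance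

-- ===== CLAIM (what is proved, stated in full; the proofs are below) =====
def Claim_equal_trace_item_history_py : Prop := ∀ (item_name : String) (category : String) (all_forks : List String) (pyspec : List (String × List (String × List (String × List (String × String))))) (preset : String), Dom_trace_item_history_py item_name category all_forks pyspec preset → Pre_trace_item_history_py item_name category all_forks pyspec preset → Spec_trace_item_history_py item_name category all_forks pyspec preset (trace_item_history_py item_name category all_forks pyspec preset)

-- ===== LEMMAS AND PROOFS =====

-- A's loop body, restated on the filtered (fork, content) pairs
def pvStep (st : List String × Option String) (p : String × String) : List String × Option String :=
  match st.2 with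
  | none => (st.1 ++ [p.1], some p.2)
  | some prev => (if p.2 ≠ prev then st.1 ++ [p.1] else st.1, some p.2)

lemma pvFold_eq_filterMap (item_name category : String) (all_forks : List String)
    (pyspec : List (String × List (String × List (String × List (String × String))))) (preset : String)
    (st : List String × Option String) :
    all_forks.foldl (fun st fork =>
      match pvContent? pyspec preset category item_name fork with
      | none => st
      | some cur =>
        match st.2 with
        | none => (st.1 ++ [fork], some cur)
        | some prev => (if cur ≠ prev then st.1 ++ [fork] else st.1, some cur)) st
    = (all_forks.filterMap (fun fork =>
        (pvContent? pyspec preset category item_name fork).map (fun c => (fork, c)))).foldl pvStep st := by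
  induction all_forks generalizing st with
  | nil => rfl
  | cons f rest ih =>
    simp only [List.foldl_cons, List.filterMap_cons]
    cases h : pvContent? pyspec preset category item_name f with
    | none => simp only [Option.map_none]; exact ih _
    | some c => simp only [Option.map_some, List.foldl_cons]; exact ih _

lemma pvFold_some (ps : List (String × String)) (acc : List String) (p : String) :
    (ps.foldl pvStep (acc, some p)).1 = acc ++ pvRunFirsts (ps.dropWhile (fun q => q.2 == p)) := by
  induction ps generalizing acc p with
  | nil => simp [pvRunFirsts]
  | cons q rest ih =>
    obtain ⟨f, c⟩ := q
    by_cases hc : c = p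
    · subst hc
      simp only [List.foldl_cons, pvStep, List.dropWhile_cons]
      simp [ih]
    · simp only [List.foldl_cons, pvStep, List.dropWhile_cons]
      have hbe : ((f, c).2 == p) = false := by simp [hc]
      simp only [hbe]
      simp only [if_pos hc]
      rw [ih]
      simp [pvRunFirsts]

lemma pvFold_none (ps : List (String × String)) (acc : List String) :
    (ps.foldl pvStep (acc, none)).1 = acc ++ pvRunFirsts ps := by
  cases ps with
  | nil => simp [pvRunFirsts]
  | cons q rest =>
    obtain ⟨f, c⟩ := q
    simp only [List.foldl_cons, pvStep]
    rw [pvFold_some]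
    simp [pvRunFirsts]

-- ===== VERDICT (by name: the statement is the Claim_ definition above) =====
theorem trace_item_history_py_spec : Claim_equal_trace_item_history_py := by
  intro item_name category all_forks pyspec preset _ _
  unfold Spec_trace_item_history_py trace_item_history_py trace_item_history_py_alt
  rw [pvFold_eq_filterMap, pvFold_none]
  simp
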